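-- pv_equiv track=rewrite | github.com/GuidoBR/Algoritmos | Rosalind/bioinformatics-textbook-track/1e.py | skew_diagram
-- ===== SOURCE A (Python) =====
-- def skew_diagram(genome):
--     qtd_c = 0
--     qtd_g = 0
--     skew = [0]
--     for i in range(len(genome)):
--         if (genome[i] == 'C'):
--             qtd_c += 1
--         elif (genome[i] == 'G'):
--             qtd_g += 1
--         skew.append(qtd_g - qtd_c)
--     return skew
-- ===== SOURCE B (Python) =====
-- def skew_diagram(genome):
--     # Divide and conquer: the skew values of a concatenation are the skew
--     # values of the left half followed by the right half's skew values
--     # shifted by the left half's total skew.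
--     def solve(s):
--         # skew values at positions 1..len(s), relative to the start of s
--         if len(s) <= 1:
--             if not s:
--                 return []
--             c = s[0]
--             return [1 if c == 'G' else -1 if c == 'C' else 0]
--         m = len(s) // 2
--         left = solve(s[:m])
--         right = solve(s[m:])
--         off = left[-1]
--         return left + [off + x for x in right]
--     return [0] + solve(genome)
-- ===== Notes on version B (the rewrite author's own statement) =====
-- stated objective: alternative
-- what changed: Replaces A's single left-to-right pass with two running counters by a divide-and-conquer recursion: the string is split in half, each half's skew values are computed recursively, and the right half's values are shifted by the left half's final skew before concatenation.
import Mathlib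
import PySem

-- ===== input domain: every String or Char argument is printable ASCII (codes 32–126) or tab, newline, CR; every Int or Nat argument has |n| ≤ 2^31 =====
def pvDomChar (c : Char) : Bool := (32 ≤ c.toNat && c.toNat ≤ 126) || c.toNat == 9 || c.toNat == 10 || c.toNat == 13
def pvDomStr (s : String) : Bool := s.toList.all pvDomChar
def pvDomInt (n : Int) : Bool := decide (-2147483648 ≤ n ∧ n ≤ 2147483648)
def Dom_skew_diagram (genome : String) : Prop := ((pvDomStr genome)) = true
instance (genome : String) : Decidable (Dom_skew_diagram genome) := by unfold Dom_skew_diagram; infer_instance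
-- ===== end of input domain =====

-- B replaces A's single pass with two counters by a divide-and-conquer recursion
-- (split in half, shift the right half's skews by the left half's total); alternative, not faster.

-- ===== PORT A =====
def skewLoopA : List Char → Int → Int → List Int → List Int
  | [], _, _, skew => skew
  | ch :: cs, qtd_c, qtd_g, skew =>
    let qtd_c' := if ch = 'C' then qtd_c + 1 else qtd_c
    let qtd_g' := if ch = 'C' then qtd_g else if ch = 'G' then qtd_g + 1 else qtd_g
    skewLoopA cs qtd_c' qtd_g' (skew ++ [qtd_g' - qtd_c'])

def skew_diagram (genome : String) : List Int :=
  skewLoopA genome.toList 0 0 [0]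

-- ===== PORT B =====
-- left[-1] is ported as getLastD 0: the branch is only reached with len(s) ≥ 2, so left ≠ []
def solveB (s : List Char) : List Int :=
  if s.length ≤ 1 then
    match s with
    | [] => []
    | c :: _ => [if c = 'G' then 1 else if c = 'C' then -1 else 0]
  else
    let m := s.length / 2
    let left := solveB (s.take m)
    let right := solveB (s.drop m)
    left ++ right.map (fun x => left.getLastD 0 + x)
termination_by s.length
decreasing_by
  · simp only [List.length_take]; omega
  · simp only [List.length_drop]; omega

def skew_diagram_alt (genome : String) : List Int :=
  [0] ++ solveB genome.toList

-- ===== PRECONDITION & SPEC =====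
def Spec_skew_diagram (genome : String) (out : List Int) : Prop := out = skew_diagram_alt genome
instance (genome : String) (out : List Int) : Decidable (Spec_skew_diagram genome out) := by unfold Spec_skew_diagram; infer_instance

-- ===== CLAIM (what is proved, stated in full; the proofs are below) =====
def Claim_equal_skew_diagram : Prop := ∀ (genome : String), Dom_skew_diagram genome → Spec_skew_diagram genome (skew_diagram genome)

-- ===== LEMMAS AND PROOFS =====
def skewDelta (ch : Char) : Int := if ch = 'G' then 1 else if ch = 'C' then -1 else 0

-- reference prefix-sum form both ports are reduced to
def skewAccum (t : Int) : List Int → List Int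
  | [] => []
  | d :: ds => (t + d) :: skewAccum (t + d) ds

theorem skewAccum_append (xs ys : List Int) : ∀ t : Int,
    skewAccum t (xs ++ ys) = skewAccum t xs ++ skewAccum (t + xs.sum) ys := by
  induction xs with
  | nil => intro t; simp [skewAccum]
  | cons d ds ih =>
    intro t
    simp only [List.cons_append, skewAccum, ih, List.sum_cons]
    rw [show t + (d + ds.sum) = t + d + ds.sum by ring]

theorem skewAccum_getLastD (xs : List Int) : ∀ t : Int,
    (skewAccum t xs).getLastD t = t + xs.sum := by
  induction xs with
  | nil => intro t; simp [skewAccum]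
  | cons d ds ih =>
    intro t
    simp only [skewAccum, List.getLastD_cons, ih, List.sum_cons]
    ring

theorem skewAccum_shift (xs : List Int) : ∀ a t : Int,
    (skewAccum t xs).map (fun x => a + x) = skewAccum (a + t) xs := by
  induction xs with
  | nil => intro a t; simp [skewAccum]
  | cons d ds ih =>
    intro a t
    simp only [skewAccum, List.map_cons, ih]
    rw [show a + t + d = a + (t + d) by ring]

theorem solveB_eq (s : List Char) : solveB s = skewAccum 0 (s.map skewDelta) := by
  induction s using solveB.induct with
  | case1 h =>
    rw [solveB.eq_def]
    simp [skewAccum]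
  | case2 c cs h =>
    rw [solveB.eq_def, if_pos h]
    match cs, h with
    | [], _ => simp [skewAccum, skewDelta]
  | case3 s h _m ihl ihr =>
    rw [solveB.eq_def, if_neg h]
    show solveB (List.take (s.length / 2) s) ++
        List.map (fun x => (solveB (List.take (s.length / 2) s)).getLastD 0 + x)
          (solveB (List.drop (s.length / 2) s)) = skewAccum 0 (List.map skewDelta s)
    have hl : solveB (List.take (s.length / 2) s)
        = skewAccum 0 (List.map skewDelta (List.take (s.length / 2) s)) := ihl
    have hr : solveB (List.drop (s.length / 2) s)
        = skewAccum 0 (List.map skewDelta (List.drop (s.length / 2) s)) := ihr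
    rw [hl, hr]
    rw [skewAccum_shift, skewAccum_getLastD]
    rw [show (0 : Int) + ((s.take (s.length / 2)).map skewDelta).sum + 0
        = 0 + ((s.take (s.length / 2)).map skewDelta).sum by ring]
    rw [← skewAccum_append, ← List.map_append, List.take_append_drop]

theorem skewLoopA_eq (cs : List Char) : ∀ (c g : Int) (skew : List Int),
    skewLoopA cs c g skew = skew ++ skewAccum (g - c) (cs.map skewDelta) := by
  induction cs with
  | nil => intro c g skew; simp [skewLoopA, skewAccum]
  | cons ch cs ih =>
    intro c g skew
    simp only [skewLoopA, List.map_cons, skewAccum, ih]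
    by_cases hC : ch = 'C' <;> by_cases hG : ch = 'G' <;>
      simp_all [skewDelta] <;> ring_nf <;> trivial

-- ===== VERDICT (by name: the statement is the Claim_ definition above) =====
theorem skew_diagram_spec : Claim_equal_skew_diagram := by
  intro genome _
  unfold Spec_skew_diagram skew_diagram skew_diagram_alt
  rw [skewLoopA_eq, solveB_eq]
  norm_num
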